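-- pv_equiv track=rewrite | github.com/LeKonArD/dissertation | code/pretrain_helper.py | pack_batches
-- ===== SOURCE A (Python) =====
-- def pack_batches(inputs, masks, trues, bsize):
--
--
--     num = 0
--     c = 0
--
--     batches = []
--
--     ins = []
--     msk = []
--     tru = []
--
--     while num < len(trues) and num < len(inputs) and num < len(masks):
--
--         ins.append(inputs[num])
--         msk.append(masks[num])
--         tru.append(trues[num])
--
--         num+=1
--         c+=1
--
--         if c == bsize:
--
--             batches.append([ins,msk,tru])
--
--             ins = []
--             msk = []
--             tru = []
--
--             c=0
--
--
--     return batches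
-- ===== SOURCE B (Python) =====
-- def pack_batches(inputs, masks, trues, bsize):
--     if bsize <= 0:
--         return []
--     n = min(len(inputs), len(masks), len(trues))
--     return [[inputs[i * bsize:(i + 1) * bsize],
--              masks[i * bsize:(i + 1) * bsize],
--              trues[i * bsize:(i + 1) * bsize]]
--             for i in range(n // bsize)]
-- ===== Notes on version B (the rewrite author's own statement) =====
-- stated objective: simpler
-- what changed: Replaces the element-by-element while loop with counter c and three accumulator lists by a closed-form batch count n//bsize and direct slicing of each batch.
import Mathlib
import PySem

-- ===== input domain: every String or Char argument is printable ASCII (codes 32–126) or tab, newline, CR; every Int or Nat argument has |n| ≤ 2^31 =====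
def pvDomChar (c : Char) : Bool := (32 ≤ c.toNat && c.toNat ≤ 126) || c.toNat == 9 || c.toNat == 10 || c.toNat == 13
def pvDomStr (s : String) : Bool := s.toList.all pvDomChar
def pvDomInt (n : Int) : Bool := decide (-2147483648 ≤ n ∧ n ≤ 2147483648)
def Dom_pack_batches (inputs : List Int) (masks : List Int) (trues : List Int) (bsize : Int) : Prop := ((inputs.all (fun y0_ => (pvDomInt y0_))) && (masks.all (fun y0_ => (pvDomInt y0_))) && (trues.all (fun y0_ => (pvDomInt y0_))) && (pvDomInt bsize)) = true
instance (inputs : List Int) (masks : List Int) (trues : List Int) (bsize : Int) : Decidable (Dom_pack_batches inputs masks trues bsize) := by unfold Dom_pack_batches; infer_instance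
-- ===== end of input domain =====

-- B replaces A's element-by-element accumulation (counter c, three growing lists) by the
-- closed-form batch count n // bsize and direct slicing of each batch (objective: simpler).

-- ===== PORT A =====
-- the while loop of A: state num (index), c (counter), batches, and the three accumulators
def packA_loop (inputs : List Int) (masks : List Int) (trues : List Int) (bsize : Int)
    (num : Nat) (c : Int) (batches : List (List (List Int)))
    (ins msk tru : List Int) : List (List (List Int)) :=
  if h : num < trues.length ∧ num < inputs.length ∧ num < masks.length then
    let ins' := ins ++ [PySem.List.pyGetD inputs (num : Int) 0]
    let msk' := msk ++ [PySem.List.pyGetD masks (num : Int) 0]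
    let tru' := tru ++ [PySem.List.pyGetD trues (num : Int) 0]
    let c' := c + 1
    if c' = bsize then
      packA_loop inputs masks trues bsize (num + 1) 0 (batches ++ [[ins', msk', tru']]) [] [] []
    else
      packA_loop inputs masks trues bsize (num + 1) c' batches ins' msk' tru'
  else
    batches
termination_by trues.length - num
decreasing_by all_goals omega

def pack_batches (inputs : List Int) (masks : List Int) (trues : List Int) (bsize : Int) : List (List (List Int)) :=
  packA_loop inputs masks trues bsize 0 0 [] [] [] []

-- ===== PORT B =====
def pack_batches_alt (inputs : List Int) (masks : List Int) (trues : List Int) (bsize : Int) : List (List (List Int)) :=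
  if bsize ≤ 0 then []
  else
    let n : Int := min (inputs.length : Int) (min (masks.length : Int) (trues.length : Int))
    (PySem.List.pyRange 0 (PySem.Int.floordiv n bsize) 1).map (fun i =>
      [PySem.List.slice inputs (some (i * bsize)) (some ((i + 1) * bsize)),
       PySem.List.slice masks (some (i * bsize)) (some ((i + 1) * bsize)),
       PySem.List.slice trues (some (i * bsize)) (some ((i + 1) * bsize))])

-- ===== PRECONDITION & SPEC =====
def Spec_pack_batches (inputs : List Int) (masks : List Int) (trues : List Int) (bsize : Int) (out : List (List (List Int))) : Prop := out = pack_batches_alt inputs masks trues bsize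
instance (inputs : List Int) (masks : List Int) (trues : List Int) (bsize : Int) (out : List (List (List Int))) : Decidable (Spec_pack_batches inputs masks trues bsize out) := by unfold Spec_pack_batches; infer_instance

-- ===== CLAIM (what is proved, stated in full; the proofs are below) =====
def Claim_equal_pack_batches : Prop := ∀ (inputs : List Int) (masks : List Int) (trues : List Int) (bsize : Int), Dom_pack_batches inputs masks trues bsize → Spec_pack_batches inputs masks trues bsize (pack_batches inputs masks trues bsize)

-- ===== LEMMAS AND PROOFS =====

-- the k elements of list l starting at index num
def pvSeg (l : List Int) (num k : Nat) : List Int := (l.drop num).take k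

def pvBatchAt (inputs masks trues : List Int) (num k : Nat) : List (List Int) :=
  [pvSeg inputs num k, pvSeg masks num k, pvSeg trues num k]

-- the full batches obtainable from index num on, with common length n and batch size k
def pvChunksFrom (inputs masks trues : List Int) (k num n : Nat) : List (List (List Int)) :=
  (List.range ((n - num) / k)).map (fun i => pvBatchAt inputs masks trues (num + i * k) k)

theorem pvSeg_cons (l : List Int) (num k : Nat) (h : num < l.length) :
    pvSeg l num (k + 1) = l[num]?.getD 0 :: pvSeg l (num + 1) k := by
  unfold pvSeg
  rw [List.drop_eq_getElem_cons h, List.take_succ_cons, List.getElem?_eq_getElem h]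
  rfl

theorem pvSeg_one (l : List Int) (num : Nat) (h : num < l.length) :
    pvSeg l num 1 = [l[num]?.getD 0] := by
  rw [pvSeg_cons l num 0 h]; rfl

-- with bsize ≤ 0 and a nonnegative counter, the loop never completes a batch
theorem packA_loop_nonpos (inputs masks trues : List Int) (bsize : Int) (hb : bsize ≤ 0) :
    ∀ m num c batches ins msk tru, trues.length - num = m → 0 ≤ c →
      packA_loop inputs masks trues bsize num c batches ins msk tru = batches := by
  intro m
  induction m using Nat.strong_induction_on with
  | _ m ih =>
    intro num c batches ins msk tru hm hc
    rw [packA_loop]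
    split
    · next h =>
      have hne : ¬ (c + 1 = bsize) := by omega
      simp only [if_neg hne]
      exact ih (trues.length - (num + 1)) (by omega) (num + 1) (c + 1) _ _ _ _ rfl (by omega)
    · rfl

-- consuming the k remaining elements of the current batch (c + k = bsize)
theorem packA_loop_fill (inputs masks trues : List Int) (bsize : Int) :
    ∀ k : Nat, 0 < k → ∀ (num : Nat) (c : Int) batches ins msk tru,
      c + k = bsize →
      packA_loop inputs masks trues bsize num c batches ins msk tru =
        if num + k ≤ min inputs.length (min masks.length trues.length) then
          packA_loop inputs masks trues bsize (num + k) 0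
            (batches ++ [[ins ++ pvSeg inputs num k, msk ++ pvSeg masks num k, tru ++ pvSeg trues num k]])
            [] [] []
        else batches := by
  intro k
  induction k with
  | zero => omega
  | succ k ih =>
    intro hk num c batches ins msk tru hc
    by_cases hcond : num < trues.length ∧ num < inputs.length ∧ num < masks.length
    · rw [packA_loop]
      simp only [dif_pos hcond, PySem.List.pyGetD_natCast]
      by_cases hk0 : k = 0
      · subst hk0
        have hc1 : c + 1 = bsize := by omega
        have hle : num + 1 ≤ min inputs.length (min masks.length trues.length) := by omega
        rw [if_pos hc1, if_pos hle, pvSeg_one inputs num hcond.2.1,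
          pvSeg_one masks num hcond.2.2, pvSeg_one trues num hcond.1]
        simp [List.getD_eq_getElem?_getD]
      · have hne : ¬ (c + 1 = bsize) := by omega
        simp only [if_neg hne]
        rw [ih (by omega) (num + 1) (c + 1) batches _ _ _ (by omega)]
        have harith : num + 1 + k = num + (k + 1) := by omega
        rw [harith, pvSeg_cons inputs num k hcond.2.1, pvSeg_cons masks num k hcond.2.2,
          pvSeg_cons trues num k hcond.1]
        split
        · simp [List.append_assoc]
        · rfl
    · rw [packA_loop]
      rw [dif_neg hcond]
      rw [if_neg (by omega)]

-- the loop from a batch-aligned state yields exactly the remaining full chunks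
theorem packA_loop_aligned (inputs masks trues : List Int) (bsize : Int) (k : Nat)
    (hk : 0 < k) (hbk : bsize = (k : Int)) :
    ∀ m num batches, min inputs.length (min masks.length trues.length) - num = m →
      packA_loop inputs masks trues bsize num 0 batches [] [] [] =
        batches ++ pvChunksFrom inputs masks trues k num (min inputs.length (min masks.length trues.length)) := by
  intro m
  induction m using Nat.strong_induction_on with
  | _ m ih =>
    intro num batches hm
    set n := min inputs.length (min masks.length trues.length) with hn
    rw [packA_loop_fill inputs masks trues bsize k hk num 0 batches [] [] [] (by omega)]
    by_cases hle : num + k ≤ n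
    · rw [if_pos hle]
      rw [ih (n - (num + k)) (by omega) (num + k) _ rfl]
      rw [List.append_assoc]
      congr 1
      -- [batch at num] ++ chunksFrom (num+k) = chunksFrom num
      have hq : (n - num) / k = (n - (num + k)) / k + 1 := by
        have h1 : n - num = (n - (num + k)) + k := by omega
        rw [h1, Nat.add_div_right _ hk]
      simp only [pvChunksFrom, hq, List.range_succ_eq_map, List.map_cons, List.map_map]
      simp only [List.singleton_append]
      congr 1
      · simp [pvBatchAt]
      · apply List.map_congr_left
        intro i _
        simp only [Function.comp]
        apply congrArg (fun t => pvBatchAt inputs masks trues t k)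
        rw [Nat.succ_mul]
        omega
    · rw [if_neg hle]
      have : (n - num) / k = 0 := Nat.div_eq_of_lt (by omega)
      simp [pvChunksFrom, this]

theorem pack_batches_alt_eq_chunks (inputs masks trues : List Int) (bsize : Int)
    (hb : 0 < bsize) :
    pack_batches_alt inputs masks trues bsize =
      pvChunksFrom inputs masks trues bsize.toNat 0
        (min inputs.length (min masks.length trues.length)) := by
  set k : Nat := bsize.toNat with hkdef
  have hbk : bsize = (k : Int) := by omega
  set n : Nat := min inputs.length (min masks.length trues.length) with hn
  have hnInt : min (inputs.length : Int) (min (masks.length : Int) (trues.length : Int)) = (n : Int) := by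
    simp [hn]
  rw [pack_batches_alt, if_neg (by omega)]
  simp only [hnInt, hbk, PySem.Int.floordiv_natCast]
  rw [PySem.List.pyRange_one]
  simp only [sub_zero, Int.toNat_natCast, List.map_map]
  unfold pvChunksFrom
  simp only [Nat.sub_zero]
  apply List.map_congr_left
  intro i _
  simp only [Function.comp, zero_add]
  have h2 : ((i : Int)) * (k : Int) = ((i * k : Nat) : Int) := by push_cast; ring
  have h3 : ((i : Int) + 1) * (k : Int) = ((i * k : Nat) : Int) + (k : Int) := by push_cast; ring
  simp only [h2, h3, PySem.List.slice_natCast_add]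
  simp [pvBatchAt, pvSeg]

-- ===== VERDICT (by name: the statement is the Claim_ definition above) =====
theorem pack_batches_spec : Claim_equal_pack_batches := by
  intro inputs masks trues bsize _
  unfold Spec_pack_batches pack_batches
  by_cases hb : bsize ≤ 0
  · rw [packA_loop_nonpos inputs masks trues bsize hb _ 0 0 [] [] [] [] rfl le_rfl]
    rw [pack_batches_alt, if_pos hb]
  · rw [not_le] at hb
    rw [packA_loop_aligned inputs masks trues bsize bsize.toNat (by omega) (by omega)
      _ 0 [] rfl]
    rw [pack_batches_alt_eq_chunks inputs masks trues bsize hb]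
    simp
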